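-- pv_equiv track=rewrite | github.com/AwesomeCuber6543/PatriotHacks2024 | app.py | detect_nystagmus
-- ===== SOURCE A (Python) =====
-- def detect_nystagmus(velocities, threshold=50):
--     nystagmus_detected = False
--     jerky_movements = 0
--
--     for left_vel, right_vel in velocities:
--         if abs(left_vel) > threshold or abs(right_vel) > threshold:
--             jerky_movements += 1
--         else:
--             jerky_movements = 0  # Reset count if no jerky movement
--
--         if jerky_movements > 3:  # If more than 3 consecutive jerky movements are detected
--             nystagmus_detected = True
--             break
--
--     return nystagmus_detected
-- ===== SOURCE B (Python) =====
-- from itertools import groupby, islice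
--
--
-- def detect_nystagmus(velocities, threshold=50):
--     jerky = (abs(l) > threshold or abs(r) > threshold for l, r in velocities)
--     for key, group in groupby(jerky):
--         # lazily check the group has at least 4 members (4th consecutive jerky frame)
--         if key and next(islice(group, 3, None), None) is not None:
--             return True
--     return False
-- ===== Notes on version B (the rewrite author's own statement) =====
-- stated objective: idiomatic
-- what changed: replaces the inline reset-counter loop by classify-then-run-length detection: map each frame to a jerky boolean and use itertools.groupby to look lazily for a run of at least 4 consecutive True values
import Mathlib
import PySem

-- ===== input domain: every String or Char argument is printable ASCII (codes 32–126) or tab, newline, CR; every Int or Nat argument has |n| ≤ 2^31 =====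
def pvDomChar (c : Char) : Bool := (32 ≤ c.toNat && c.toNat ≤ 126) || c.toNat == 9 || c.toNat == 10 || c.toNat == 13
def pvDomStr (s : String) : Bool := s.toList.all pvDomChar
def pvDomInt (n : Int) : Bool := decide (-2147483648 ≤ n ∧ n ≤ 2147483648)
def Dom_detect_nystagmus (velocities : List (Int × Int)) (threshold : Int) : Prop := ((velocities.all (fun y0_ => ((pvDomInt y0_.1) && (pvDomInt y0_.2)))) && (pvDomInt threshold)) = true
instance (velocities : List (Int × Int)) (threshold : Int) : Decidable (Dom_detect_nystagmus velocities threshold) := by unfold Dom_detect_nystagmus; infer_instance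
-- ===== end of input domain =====

-- B replaces A's inline reset-counter loop by classify-then-run-length detection
-- (map to jerky booleans, group consecutive equal values, look for a True run of length ≥ 4);
-- same O(n) cost, objective: idiomatic decomposition.

-- ===== PORT A =====
-- literal port of A's loop: the counter `jerky`, reset on a calm frame, early break when > 3
def detect_nystagmus_go (threshold : Int) : List (Int × Int) → Int → Bool
  | [], _ => false
  | (l, r) :: rest, jerky =>
    let jerky' := if |l| > threshold || |r| > threshold then jerky + 1 else 0
    if jerky' > 3 then true else detect_nystagmus_go threshold rest jerky'

def detect_nystagmus (velocities : List (Int × Int)) (threshold : Int) : Bool :=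
  detect_nystagmus_go threshold velocities 0

-- ===== PORT B =====
-- is_jerky((l, r)) from Source B
def pvIsJerky (threshold : Int) (p : Int × Int) : Bool := |p.1| > threshold || |p.2| > threshold

-- itertools.groupby on a Bool sequence: list of (key, run length)
def pvGroupRuns : List Bool → List (Bool × Nat)
  | [] => []
  | b :: rest =>
    match pvGroupRuns rest with
    | (k, n) :: t => if k = b then (b, n + 1) :: t else (b, 1) :: (k, n) :: t
    | [] => [(b, 1)]

-- scan the groups for a True group with at least 4 members
def detect_nystagmus_alt (velocities : List (Int × Int)) (threshold : Int) : Bool :=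
  (pvGroupRuns (velocities.map (pvIsJerky threshold))).any (fun g => g.1 && decide (4 ≤ g.2))

-- ===== PRECONDITION & SPEC =====
def Spec_detect_nystagmus (velocities : List (Int × Int)) (threshold : Int) (out : Bool) : Prop := out = detect_nystagmus_alt velocities threshold
instance (velocities : List (Int × Int)) (threshold : Int) (out : Bool) : Decidable (Spec_detect_nystagmus velocities threshold out) := by unfold Spec_detect_nystagmus; infer_instance

-- ===== CLAIM (what is proved, stated in full; the proofs are below) =====
def Claim_equal_detect_nystagmus : Prop := ∀ (velocities : List (Int × Int)) (threshold : Int), Dom_detect_nystagmus velocities threshold → Spec_detect_nystagmus velocities threshold (detect_nystagmus velocities threshold)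

-- ===== LEMMAS AND PROOFS =====

-- "some group is a True run of length ≥ 4"
def pvHasRun (gs : List (Bool × Nat)) : Bool := gs.any (fun g => g.1 && decide (4 ≤ g.2))

-- A's loop state summarised against B's groups: the incoming counter j is added to a leading True run
def pvRunCheck (j : Int) : List (Bool × Nat) → Bool
  | (true, n) :: t => decide (4 ≤ j + (n : Int)) || pvHasRun t
  | gs => pvHasRun gs

theorem pvHasRun_false_cons (n : Nat) (t : List (Bool × Nat)) :
    pvHasRun ((false, n) :: t) = pvHasRun t := by
  simp [pvHasRun]

theorem detect_nystagmus_go_eq (threshold : Int) (v : List (Int × Int)) :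
    ∀ j : Int, detect_nystagmus_go threshold v j
      = pvRunCheck j (pvGroupRuns (v.map (pvIsJerky threshold))) := by
  induction v with
  | nil => intro j; simp [detect_nystagmus_go, pvGroupRuns, pvRunCheck, pvHasRun]
  | cons p rest ih =>
    intro j
    obtain ⟨l, r⟩ := p
    by_cases hb : (|l| > threshold || |r| > threshold) = true
    · -- jerky frame: counter increments
      by_cases hj : j + 1 > 3
      · -- A breaks with True; B's leading True run has length ≥ 1 and j ≥ 3
        have hA : detect_nystagmus_go threshold ((l, r) :: rest) j = true := by
          simp [detect_nystagmus_go, hb, hj]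
        rw [hA]
        simp only [List.map, pvIsJerky, pvGroupRuns]
        rcases hgs : pvGroupRuns (rest.map (pvIsJerky threshold)) with _ | ⟨⟨k, n⟩, t⟩
        · simp [hb, pvRunCheck]; omega
        · cases k
          · simp [hb, pvRunCheck]; left; omega
          · simp [hb, pvRunCheck]; left; omega
      · have hA : detect_nystagmus_go threshold ((l, r) :: rest) j
            = detect_nystagmus_go threshold rest (j + 1) := by
          simp [detect_nystagmus_go, hb, hj]
        rw [hA, ih (j + 1)]
        simp only [List.map, pvIsJerky, pvGroupRuns]
        rcases hgs : pvGroupRuns (rest.map (pvIsJerky threshold)) with _ | ⟨⟨k, n⟩, t⟩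
        · simp [hb, pvRunCheck, pvHasRun]; omega
        · cases k
          · simp [hb, pvRunCheck, pvHasRun_false_cons]; omega
          · simp [hb, pvRunCheck]
            rw [show j + 1 + (n : Int) = j + ((n : Int) + 1) by ring]
    · -- calm frame: counter resets
      have hA : detect_nystagmus_go threshold ((l, r) :: rest) j
          = detect_nystagmus_go threshold rest 0 := by
        simp [detect_nystagmus_go, hb]
      rw [hA, ih 0]
      simp only [List.map, pvIsJerky, pvGroupRuns]
      have hb' : (|l| > threshold || |r| > threshold) = false := by
        simpa using hb
      rcases hgs : pvGroupRuns (rest.map (pvIsJerky threshold)) with _ | ⟨⟨k, n⟩, t⟩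
      · simp [hb', pvRunCheck, pvHasRun]
      · cases k
        · simp [hb', pvRunCheck, pvHasRun_false_cons]
        · simp [hb', pvRunCheck, pvHasRun]

-- ===== VERDICT (by name: the statement is the Claim_ definition above) =====
theorem detect_nystagmus_spec : Claim_equal_detect_nystagmus := by
  intro v t _
  unfold Spec_detect_nystagmus detect_nystagmus detect_nystagmus_alt
  rw [detect_nystagmus_go_eq]
  rcases hgs : pvGroupRuns (v.map (pvIsJerky t)) with _ | ⟨⟨k, n⟩, t'⟩
  · simp [pvRunCheck, pvHasRun]
  · cases k
    · simp [pvRunCheck, pvHasRun]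
    · simp [pvRunCheck, pvHasRun]
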